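-- pv_equiv track=rewrite | github.com/oraoraoraaa/cross-ecosystem-replication | scripts/6_analyze_patterns/detect_platform_folders.py | extract_folders_from_directory_structure
-- ===== SOURCE A (Python) =====
-- from typing import Dict, List, Optional, Set, Tuple
--
-- def extract_folders_from_directory_structure(directory_structure: List[str]) -> Set[Tuple[str, str]]:
--     """
--     Extract all unique folder paths from directory_structure.
--
--     The directory_structure is a list of all paths (both files and folders).
--     Folders are entries that don't have a file extension or have subdirectories.
--
--     Args:
--         directory_structure: List of all paths in the repository
--
--     Returns:
--         Set of (folder_path, folder_name) tuples
--     """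
--     folders = set()
--
--     # Efficiently extract all parent folders in a single pass
--     for path in directory_structure:
--         parts = path.split('/')
--
--         # Extract all parent folders from the path
--         for i in range(len(parts)):
--             folder_path = '/'.join(parts[:i+1])
--             folder_name = parts[i]
--             folders.add((folder_path, folder_name))
--
--     return folders
-- ===== SOURCE B (Python) =====
-- from typing import Dict, List, Optional, Set, Tuple
--
-- def extract_folders_from_directory_structure(directory_structure: List[str]) -> Set[Tuple[str, str]]:
--     """Same result as A, but each path's prefixes are built with a running
--     accumulator instead of re-joining a growing slice for every component."""
--     folders = set()
--     for path in directory_structure: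
--         first, *rest = path.split('/')
--         acc = first
--         folders.add((acc, first))
--         for part in rest:
--             acc = acc + '/' + part
--             folders.add((acc, part))
--     return folders
-- ===== Notes on version B (the rewrite author's own statement) =====
-- stated objective: faster
-- what changed: Replaces the per-component slice-and-join ('/'.join(parts[:i+1]) for every i, quadratic in the number of components) with a single running-prefix accumulator that extends the joined prefix by one segment per step.
import Mathlib
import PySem

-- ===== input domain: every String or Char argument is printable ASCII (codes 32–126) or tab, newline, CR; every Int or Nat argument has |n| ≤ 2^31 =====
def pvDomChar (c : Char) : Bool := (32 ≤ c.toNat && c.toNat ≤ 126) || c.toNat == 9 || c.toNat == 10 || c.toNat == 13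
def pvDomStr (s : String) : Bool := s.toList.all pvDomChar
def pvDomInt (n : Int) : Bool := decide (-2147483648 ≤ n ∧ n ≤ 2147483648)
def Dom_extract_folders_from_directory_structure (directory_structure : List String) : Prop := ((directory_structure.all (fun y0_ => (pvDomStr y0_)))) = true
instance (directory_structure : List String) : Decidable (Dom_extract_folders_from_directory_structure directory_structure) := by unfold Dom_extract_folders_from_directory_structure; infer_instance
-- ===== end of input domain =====

-- B replaces A's per-component slice-and-join ('/'.join(parts[:i+1]) for every i) by a single
-- running-prefix accumulator extended by one segment per step; same returned set, in the same order.

-- ===== PORT A =====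
def extract_folders_from_directory_structure (directory_structure : List String) : List (String × String) :=
  directory_structure.foldl (fun folders path =>
    -- parts = path.split('/'); the separator "/" is non-empty, so split? is always `some`
    let parts := (PySem.Str.split? path "/").getD []
    (PySem.List.pyRange 0 (parts.length : Int) 1).foldl (fun folders i =>
      let folder_path := PySem.Str.join "/" (PySem.List.slice parts none (some (i + 1)))
      let folder_name := PySem.List.pyGetD parts i ""
      PySem.Set.add folders (folder_path, folder_name)) folders) PySem.Set.empty

-- ===== PORT B =====
-- exact port of Python's 'a + b' on str (plain concatenation), kept over List Char via ofList/toList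
def pyConcat (a b : String) : String := String.ofList (a.toList ++ b.toList)

def extract_folders_from_directory_structure_alt (directory_structure : List String) : List (String × String) :=
  directory_structure.foldl (fun folders path =>
    match (PySem.Str.split? path "/").getD [] with
    | [] => folders          -- unreachable: str.split never returns an empty list
    | first :: rest =>
      (rest.foldl (fun (st : String × List (String × String)) part =>
          let acc := pyConcat (pyConcat st.1 "/") part
          (acc, PySem.Set.add st.2 (acc, part)))
        (first, PySem.Set.add folders (first, first))).2) PySem.Set.empty

-- ===== PRECONDITION & SPEC =====
def Spec_extract_folders_from_directory_structure (directory_structure : List String) (out : List (String × String)) : Prop := out = extract_folders_from_directory_structure_alt directory_structure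
instance (directory_structure : List String) (out : List (String × String)) : Decidable (Spec_extract_folders_from_directory_structure directory_structure out) := by unfold Spec_extract_folders_from_directory_structure; infer_instance

-- ===== CLAIM (what is proved, stated in full; the proofs are below) =====
def Claim_equal_extract_folders_from_directory_structure : Prop := ∀ (directory_structure : List String), Dom_extract_folders_from_directory_structure directory_structure → Spec_extract_folders_from_directory_structure directory_structure (extract_folders_from_directory_structure directory_structure)

-- ===== LEMMAS AND PROOFS =====

lemma intersperse_cc (sep a b : List Char) (l : List (List Char)) :
    List.intersperse sep (a :: b :: l) = a :: sep :: List.intersperse sep (b :: l) := rfl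

lemma chars_join_append (sep : List Char) (l : List (List Char)) (hl : l ≠ []) (x : List Char) :
    PySem.Chars.join sep (l ++ [x]) = PySem.Chars.join sep l ++ sep ++ x := by
  obtain ⟨a, l', rfl⟩ := List.exists_cons_of_ne_nil hl
  induction l' generalizing a with
  | nil => simp [PySem.Chars.join, List.intercalate, List.intersperse, List.append_assoc]
  | cons b l'' ih =>
      have hb := ih b (by simp)
      simp only [PySem.Chars.join, List.intercalate, List.cons_append] at hb ⊢
      rw [intersperse_cc, intersperse_cc]
      simp only [List.flatten_cons]
      rw [hb]
      simp [List.append_assoc]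

lemma str_join_singleton (x : String) : PySem.Str.join "/" [x] = x := by
  simp [PySem.Str.join, PySem.Chars.join, List.intercalate]

lemma str_join_append (l : List String) (hl : l ≠ []) (x : String) :
    PySem.Str.join "/" (l ++ [x]) = pyConcat (pyConcat (PySem.Str.join "/" l) "/") x := by
  have hmap : l.map String.toList ≠ [] := by simpa using hl
  simp only [pyConcat, PySem.Str.join, String.toList_ofList, List.map_append, List.map_cons,
    List.map_nil]
  rw [chars_join_append _ _ hmap]

-- B's inner loop step
def bStep (st : String × List (String × String)) (part : String) : String × List (String × String) :=
  let acc := pyConcat (pyConcat st.1 "/") part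
  (acc, PySem.Set.add st.2 (acc, part))

lemma a_tail (rest : List String) : ∀ (done : List String), done ≠ [] → ∀ (s : List (String × String)),
    (PySem.List.pyRange (done.length : Int) ((done.length : Int) + (rest.length : Int)) 1).foldl
      (fun folders i =>
        let folder_path := PySem.Str.join "/" (PySem.List.slice (done ++ rest) none (some (i + 1)))
        let folder_name := PySem.List.pyGetD (done ++ rest) i ""
        PySem.Set.add folders (folder_path, folder_name)) s
    = (rest.foldl bStep (PySem.Str.join "/" done, s)).2 := by
  induction rest with
  | nil =>
      intro done hd s
      rw [PySem.List.pyRange_one_eq_nil (by simp)]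
      rfl
  | cons part rest' ih =>
      intro done hd s
      have hlt : (done.length : Int) < (done.length : Int) + ((part :: rest').length : Int) := by
        simp only [List.length_cons]; push_cast; omega
      rw [PySem.List.pyRange_one_cons hlt]
      simp only [List.foldl_cons]
      have h2 : done ++ part :: rest' = (done ++ [part]) ++ rest' := by simp
      have hslice : PySem.List.slice (done ++ part :: rest') none (some ((done.length : Int) + 1))
          = done ++ [part] := by
        have h1 : ((done.length : Int) + 1) = (((done.length + 1 : Nat)) : Int) := by push_cast; ring
        rw [h1, PySem.List.slice_to_natCast, h2, List.take_left' (by simp)]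
      have hget : PySem.List.pyGetD (done ++ part :: rest') ((done.length : Int)) "" = part := by
        rw [PySem.List.pyGetD_natCast]
        simp [List.getD_eq_getElem?_getD]
      rw [hslice, hget]
      have hb : bStep (PySem.Str.join "/" done, s) part
          = (PySem.Str.join "/" (done ++ [part]),
             PySem.Set.add s (PySem.Str.join "/" (done ++ [part]), part)) := by
        simp [bStep, str_join_append done hd part]
      rw [hb]
      have hlen2 : ((done ++ [part]).length : Nat) = done.length + 1 := by simp
      have hstart : (done.length : Int) + 1 = (((done ++ [part]).length : Nat) : Int) := by
        rw [hlen2]; push_cast; ring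
      have hend : (done.length : Int) + ((part :: rest').length : Int)
          = (((done ++ [part]).length : Nat) : Int) + (rest'.length : Int) := by
        rw [hlen2]; simp only [List.length_cons]; push_cast; ring
      rw [h2, hstart, hend, ih (done ++ [part]) (by simp)]

lemma per_path (parts : List String) (s : List (String × String)) :
    (PySem.List.pyRange 0 (parts.length : Int) 1).foldl (fun folders i =>
      let folder_path := PySem.Str.join "/" (PySem.List.slice parts none (some (i + 1)))
      let folder_name := PySem.List.pyGetD parts i ""
      PySem.Set.add folders (folder_path, folder_name)) s
    = (match parts with
       | [] => s
       | first :: rest => (rest.foldl bStep (first, PySem.Set.add s (first, first))).2) := by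
  match parts with
  | [] => rw [PySem.List.pyRange_one_eq_nil (by simp)]; rfl
  | first :: rest =>
      have hlt : (0 : Int) < (((first :: rest).length : Nat) : Int) := by
        simp only [List.length_cons]; push_cast; omega
      rw [PySem.List.pyRange_one_cons hlt]
      simp only [List.foldl_cons]
      have hslice : PySem.List.slice (first :: rest) none (some ((0 : Int) + 1)) = [first] := by
        have h1 : ((0 : Int) + 1) = (((1 : Nat)) : Int) := by norm_num
        rw [h1, PySem.List.slice_to_natCast]
        simp
      have hget : PySem.List.pyGetD (first :: rest) (0 : Int) "" = first := by
        rw [show (0 : Int) = ((0 : Nat) : Int) from rfl, PySem.List.pyGetD_natCast]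
        simp
      rw [hslice, hget, str_join_singleton]
      have htail := a_tail rest [first] (by simp) (PySem.Set.add s (first, first))
      simp only [List.singleton_append, List.length_cons, List.length_nil, Nat.zero_add] at htail
      rw [str_join_singleton] at htail
      have h01 : (0 : Int) + 1 = ((1 : Nat) : Int) := by norm_num
      have hlen : (((first :: rest).length : Nat) : Int) = ((1 : Nat) : Int) + (rest.length : Int) := by
        simp only [List.length_cons]; push_cast; ring
      rw [h01, hlen]
      exact htail

-- ===== VERDICT (by name: the statement is the Claim_ definition above) =====
theorem extract_folders_from_directory_structure_spec : Claim_equal_extract_folders_from_directory_structure := by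
  intro ds _
  unfold Spec_extract_folders_from_directory_structure
  unfold extract_folders_from_directory_structure extract_folders_from_directory_structure_alt
  congr 1
  funext folders path
  simpa [bStep] using per_path ((PySem.Str.split? path "/").getD []) folders
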